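-- pv_equiv track=rewrite | github.com/kes256/AoC_2020 | day14.py | update_address
-- ===== SOURCE A (Python) =====
-- def update_address(num, fixed, floating):
--     address_list = []
--     base_num = (num & ~floating) | fixed
--     floating = bin(floating)[2:]
--     length = len(floating)
--     floating_bits = [floating.find('1'),]
--     count = floating.count('1')
--     for i in range(count - 1):
--         floating_bits.append(floating.find('1', floating_bits[-1]+1))
--     for bits in range(2 ** count):
--         alteration = floating
--         changes = format(bits, f'0{count}b')
--         for bit in range(count):
--             i = floating_bits[bit]
--             if i == 0:
--                 alteration = changes[bit] + alteration[i + 1:]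
--             elif i == length - 1:
--                 alteration = alteration[:i] + changes[bit]
--             else:
--                 alteration = alteration[:i] + changes[bit] + alteration[i + 1:]
--         address_list.append(base_num + int(alteration, 2))
--     return address_list
-- ===== SOURCE B (Python) =====
-- def update_address(num, fixed, floating):
--     base = (num & ~floating) | fixed
--     addresses = [base]
--     for p in range(floating.bit_length()):
--         if floating >> p & 1:
--             addresses += [a + (1 << p) for a in addresses]
--     return addresses
-- ===== Notes on version B (the rewrite author's own statement) =====
-- stated objective: faster
-- what changed: A enumerates all 2^k change patterns and for each one rebuilds and re-parses the binary mask string (find/format/slicing/int); B never touches strings: it scans the set bits of `floating` once and doubles the address list in place (addresses += [a + bit for a in addresses]), reusing previously computed sums.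
import Mathlib
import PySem

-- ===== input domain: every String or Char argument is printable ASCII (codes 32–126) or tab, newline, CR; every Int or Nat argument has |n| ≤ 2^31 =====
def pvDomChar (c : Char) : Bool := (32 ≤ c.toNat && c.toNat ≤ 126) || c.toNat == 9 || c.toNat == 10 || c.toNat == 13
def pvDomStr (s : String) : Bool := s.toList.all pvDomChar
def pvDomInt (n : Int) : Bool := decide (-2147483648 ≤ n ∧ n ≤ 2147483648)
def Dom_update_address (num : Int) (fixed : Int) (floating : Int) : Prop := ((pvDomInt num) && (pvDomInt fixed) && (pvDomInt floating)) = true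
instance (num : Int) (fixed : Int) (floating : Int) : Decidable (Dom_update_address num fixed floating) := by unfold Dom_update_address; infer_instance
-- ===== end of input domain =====

-- B replaces A's per-pattern binary-string rebuild/re-parse (2^k patterns × string work) by a single
-- doubling pass over the set bits of `floating`, reusing previously computed sums (objective: faster).

-- ===== PORT A =====
-- literal port of A; strings are handled at the List Char level via PySem.Chars;
-- format(bits, f'0{count}b') = PySem.Chars.zfill (PySem.Int.toBinChars bits) count for bits ≥ 0 (bits ranges over range(2**count));
-- int(alteration, 2) = PySem.Int.ofCharsBase? (none = ValueError, which happens exactly when floating < 0: excluded by Pre_)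
def update_address (num : Int) (fixed : Int) (floating : Int) : List Int :=
  let base_num : Int := PySem.Int.bor (PySem.Int.band num (Int.not floating)) fixed
  let fl : List Char := PySem.List.slice (PySem.Int.pyBin floating).toList (some 2) none
  let length : Int := PySem.List.len fl
  let count : Nat := PySem.Chars.count fl ['1']
  let floating_bits : List Int :=
    (PySem.List.pyRange 0 ((count : Int) - 1) 1).foldl
      (fun fb _i => fb ++ [PySem.Chars.findFrom fl ['1'] (PySem.List.pyGetD fb (-1) 0 + 1) none])
      [PySem.Chars.find fl ['1']]
  (PySem.List.pyRange 0 ((2 : Int) ^ count) 1).foldl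
    (fun address_list bits =>
      let changes : List Char := PySem.Chars.zfill (PySem.Int.toBinChars bits) (count : Int)
      let alteration : List Char :=
        (PySem.List.pyRange 0 (count : Int) 1).foldl
          (fun alteration bit =>
            let i : Int := PySem.List.pyGetD floating_bits bit 0
            if i = 0 then
              PySem.List.pyGetD changes bit ' ' :: PySem.List.slice alteration (some (i + 1)) none
            else if i = length - 1 then
              PySem.List.slice alteration none (some i) ++ [PySem.List.pyGetD changes bit ' ']
            else
              PySem.List.slice alteration none (some i) ++
                PySem.List.pyGetD changes bit ' ' :: PySem.List.slice alteration (some (i + 1)) none)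
          fl
      address_list ++ [base_num + (PySem.Int.ofCharsBase? alteration 2).getD 0])
    []

-- ===== PORT B =====
-- literal port of Source B: scan bit positions of floating, double the address list at each set bit
def update_address_alt (num : Int) (fixed : Int) (floating : Int) : List Int :=
  let base : Int := PySem.Int.bor (PySem.Int.band num (Int.not floating)) fixed
  (PySem.List.pyRange 0 (PySem.Int.bitLength floating : Int) 1).foldl
    (fun addresses p =>
      if PySem.Int.band (floating >>> p.toNat) 1 = 1 then
        addresses ++ addresses.map (fun a => a + ((1 : Int) <<< p.toNat))
      else addresses)
    [base]

-- ===== PRECONDITION & SPEC =====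
-- Pre_ excludes exactly floating < 0, where A raises ValueError: bin(floating)[2:] then still
-- contains 'b', so int(alteration, 2) fails on the first loop iteration.
def Pre_update_address (num : Int) (fixed : Int) (floating : Int) : Prop := 0 ≤ floating
instance (num : Int) (fixed : Int) (floating : Int) : Decidable (Pre_update_address num fixed floating) := by unfold Pre_update_address; infer_instance
def pvWitness_update_address : Int × Int × Int := (11, 2, 5)

def Spec_update_address (num : Int) (fixed : Int) (floating : Int) (out : List Int) : Prop := out = update_address_alt num fixed floating
instance (num : Int) (fixed : Int) (floating : Int) (out : List Int) : Decidable (Spec_update_address num fixed floating out) := by unfold Spec_update_address; infer_instance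

-- ===== CLAIM (what is proved, stated in full; the proofs are below) =====
def Claim_equal_update_address : Prop := ∀ (num : Int) (fixed : Int) (floating : Int), Dom_update_address num fixed floating → Pre_update_address num fixed floating → Spec_update_address num fixed floating (update_address num fixed floating)

-- ===== LEMMAS AND PROOFS =====

-- ---- proof-side definitions ----

def step01 (a : Nat) (c : Char) : Nat := a * 2 + (if c = '1' then 1 else 0)

def binvalN (cs : List Char) : Nat := cs.foldl step01 0

-- public clone of PySem's private base-b digit checker (defeq to it)
def myDigitOk (b : Nat) (c : Char) : Bool :=
  match PySem.Int.digitVal? c with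
  | some d => decide (d < b)
  | none => false

-- public clone of PySem's private digit-string parser loop (defeq to it)
def myGo (b : Nat) : List Char → Bool → Nat → Option Nat
  | [], afterDigit, acc => if afterDigit = true then some acc else none
  | c :: rest, afterDigit, acc =>
    if myDigitOk b c = true then myGo b rest true (acc * b + (PySem.Int.digitVal? c).getD 0)
    else
      if c = '_' ∧ afterDigit = true then
        match rest with
        | _d :: _tail => if myDigitOk b _d = true then myGo b rest false acc else none
        | [] => none
      else none

-- binary digits of n, MSB first, no leading zeros ("0" for 0) — = Nat.toDigits 2 n
def myBits (n : Nat) : List Char :=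
  if h : n < 2 then [Nat.digitChar n] else myBits (n / 2) ++ [Nat.digitChar (n % 2)]
  decreasing_by exact Nat.div_lt_self (by omega) one_lt_two

-- positions (offset k) of the '1' characters of s
def posFrom : List Char → Nat → List Nat
  | [], _ => []
  | c :: t, k => if c = '1' then k :: posFrom t (k + 1) else posFrom t (k + 1)

-- the c-wide zero-padded binary string of m (= format(m, f'0{c}b'))
def chStr (c m : Nat) : List Char := PySem.Chars.zfill (myBits m) (c : Int)

-- substitute ch[j] at position ps[j], left to right
def substF : List Nat → List Char → List Char → List Char
  | p :: ps, c :: ch, xs => substF ps ch (xs.set p c)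
  | _, _, xs => xs

-- subset sums of vs (vs in DESCENDING order of significance), in A's enumeration order
def expected : List Nat → List Nat
  | [] => [0]
  | v :: vs => expected vs ++ (expected vs).map (· + v)

-- ---- parse block ----

theorem myGo_val (l : List Char) (h01 : ∀ c ∈ l, c = '0' ∨ c = '1') (acc : Nat) :
    myGo 2 l true acc = some (l.foldl step01 acc) := by
  induction l generalizing acc with
  | nil => rfl
  | cons c rest ih =>
    rcases h01 c List.mem_cons_self with rfl | rfl <;>
      simp [myGo, myDigitOk, PySem.Int.digitVal?, step01,
        ih (fun c hc => h01 c (List.mem_cons_of_mem _ hc))]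

theorem myGo_top (l : List Char) (h01 : ∀ c ∈ l, c = '0' ∨ c = '1') (hne : l ≠ []) :
    myGo 2 l false 0 = some (binvalN l) := by
  match l, hne with
  | c :: rest, _ =>
    have hrest : ∀ x ∈ rest, x = '0' ∨ x = '1' := fun x hx => h01 x (List.mem_cons_of_mem _ hx)
    rcases h01 c List.mem_cons_self with rfl | rfl <;>
      simp [myGo, myDigitOk, PySem.Int.digitVal?, binvalN, List.foldl_cons, step01,
        myGo_val rest hrest]

theorem parse01 (cs : List Char) (h01 : ∀ c ∈ cs, c = '0' ∨ c = '1') (hne : cs ≠ []) :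
    PySem.Int.ofCharsBase? cs 2 = some ((binvalN cs : Int)) := by
  obtain ⟨c0, cs1, rfl⟩ := List.exists_cons_of_ne_nil hne
  clear hne
  cases cs1 with
  | nil =>
    rcases h01 c0 List.mem_cons_self with rfl | rfl <;> decide
  | cons c1 cs2 =>
    have hns : ∀ c ∈ c0 :: c1 :: cs2, PySem.Int.isIntSpace c = false := by
      intro c hc; rcases h01 c hc with rfl | rfl <;> decide
    unfold PySem.Int.ofCharsBase?
    have h1 : List.dropWhile PySem.Int.isIntSpace (c0 :: c1 :: cs2) = c0 :: c1 :: cs2 := by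
      rw [List.dropWhile_eq_self_iff]
      intro hl
      rw [hns _ (List.getElem_mem _)]
      simp
    rw [h1]
    have h2 : List.dropWhile PySem.Int.isIntSpace (c0 :: c1 :: cs2).reverse = (c0 :: c1 :: cs2).reverse := by
      rw [List.dropWhile_eq_self_iff]
      intro hl
      rw [hns _ (List.mem_reverse.1 (List.getElem_mem _))]
      simp
    rw [h2, List.reverse_reverse]
    rcases h01 c0 List.mem_cons_self with rfl | rfl <;>
      rcases h01 c1 (List.mem_cons_of_mem _ List.mem_cons_self) with rfl | rfl
    · simp
      have key : (match myGo 2 ('0' :: '0' :: cs2) false 0 with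
          | none => none
          | some n => some ((n : Int))) = some ((binvalN ('0' :: '0' :: cs2) : Int)) := by
        rw [myGo_top ('0' :: '0' :: cs2) h01 (by simp)]
      convert key using 2
      conv_lhs => whnf
      conv_rhs => whnf
      generalize ((0 * 2 + (PySem.Int.digitVal? '0').getD 0) * 2 + (PySem.Int.digitVal? '0').getD 0 : Nat) = acc
      have h01' : ∀ c ∈ cs2, c = '0' ∨ c = '1' := fun c hc => h01 c (by simp [hc])
      clear h1 h2 hns h01 key
      induction cs2 generalizing acc with
      | nil => rfl
      | cons c cs3 ih =>
        rcases h01' c List.mem_cons_self with rfl | rfl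
        · conv_lhs => whnf
          conv_rhs => whnf
          exact ih _ (fun c hc => h01' c (List.mem_cons_of_mem _ hc))
        · conv_lhs => whnf
          conv_rhs => whnf
          exact ih _ (fun c hc => h01' c (List.mem_cons_of_mem _ hc))
    · simp
      have key : (match myGo 2 ('0' :: '1' :: cs2) false 0 with
          | none => none
          | some n => some ((n : Int))) = some ((binvalN ('0' :: '1' :: cs2) : Int)) := by
        rw [myGo_top ('0' :: '1' :: cs2) h01 (by simp)]
      convert key using 2
      conv_lhs => whnf
      conv_rhs => whnf
      generalize ((0 * 2 + (PySem.Int.digitVal? '0').getD 0) * 2 + (PySem.Int.digitVal? '1').getD 0 : Nat) = acc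
      have h01' : ∀ c ∈ cs2, c = '0' ∨ c = '1' := fun c hc => h01 c (by simp [hc])
      clear h1 h2 hns h01 key
      induction cs2 generalizing acc with
      | nil => rfl
      | cons c cs3 ih =>
        rcases h01' c List.mem_cons_self with rfl | rfl
        · conv_lhs => whnf
          conv_rhs => whnf
          exact ih _ (fun c hc => h01' c (List.mem_cons_of_mem _ hc))
        · conv_lhs => whnf
          conv_rhs => whnf
          exact ih _ (fun c hc => h01' c (List.mem_cons_of_mem _ hc))
    · simp
      have key : (match myGo 2 ('1' :: '0' :: cs2) false 0 with
          | none => none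
          | some n => some ((n : Int))) = some ((binvalN ('1' :: '0' :: cs2) : Int)) := by
        rw [myGo_top ('1' :: '0' :: cs2) h01 (by simp)]
      convert key using 2
      conv_lhs => whnf
      conv_rhs => whnf
      generalize ((0 * 2 + (PySem.Int.digitVal? '1').getD 0) * 2 + (PySem.Int.digitVal? '0').getD 0 : Nat) = acc
      have h01' : ∀ c ∈ cs2, c = '0' ∨ c = '1' := fun c hc => h01 c (by simp [hc])
      clear h1 h2 hns h01 key
      induction cs2 generalizing acc with
      | nil => rfl
      | cons c cs3 ih =>
        rcases h01' c List.mem_cons_self with rfl | rfl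
        · conv_lhs => whnf
          conv_rhs => whnf
          exact ih _ (fun c hc => h01' c (List.mem_cons_of_mem _ hc))
        · conv_lhs => whnf
          conv_rhs => whnf
          exact ih _ (fun c hc => h01' c (List.mem_cons_of_mem _ hc))
    · simp
      have key : (match myGo 2 ('1' :: '1' :: cs2) false 0 with
          | none => none
          | some n => some ((n : Int))) = some ((binvalN ('1' :: '1' :: cs2) : Int)) := by
        rw [myGo_top ('1' :: '1' :: cs2) h01 (by simp)]
      convert key using 2
      conv_lhs => whnf
      conv_rhs => whnf
      generalize ((0 * 2 + (PySem.Int.digitVal? '1').getD 0) * 2 + (PySem.Int.digitVal? '1').getD 0 : Nat) = acc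
      have h01' : ∀ c ∈ cs2, c = '0' ∨ c = '1' := fun c hc => h01 c (by simp [hc])
      clear h1 h2 hns h01 key
      induction cs2 generalizing acc with
      | nil => rfl
      | cons c cs3 ih =>
        rcases h01' c List.mem_cons_self with rfl | rfl
        · conv_lhs => whnf
          conv_rhs => whnf
          exact ih _ (fun c hc => h01' c (List.mem_cons_of_mem _ hc))
        · conv_lhs => whnf
          conv_rhs => whnf
          exact ih _ (fun c hc => h01' c (List.mem_cons_of_mem _ hc))

-- ---- binary-digits block ----

theorem myBits_lt_two {n : Nat} (h : n < 2) : myBits n = [n.digitChar] := by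
  rw [myBits]; simp [h]

theorem myBits_ge_two {n : Nat} (h : ¬ n < 2) : myBits n = myBits (n / 2) ++ [(n % 2).digitChar] := by
  rw [myBits]; simp [h]

theorem toDigitsCore_eq : ∀ (fuel n : Nat) (ds : List Char), n < fuel →
    Nat.toDigitsCore 2 fuel n ds = myBits n ++ ds := by
  intro fuel
  induction fuel with
  | zero => intro n ds h; omega
  | succ fuel ih =>
    intro n ds h
    rw [Nat.toDigitsCore]
    by_cases h2 : n < 2
    · have hd : n / 2 = 0 := by omega
      have hm : n % 2 = n := by omega
      rw [myBits_lt_two h2, hm]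
      simp [hd]
    · have hd : ¬ n / 2 = 0 := by omega
      simp only [hd, if_false]
      rw [ih (n / 2) _ (by omega), myBits_ge_two h2, List.append_assoc]
      rfl

theorem toDigits_two (n : Nat) : Nat.toDigits 2 n = myBits n := by
  have := toDigitsCore_eq (n + 1) n [] (Nat.lt_succ_self n)
  simpa [Nat.toDigits] using this

theorem myBits_01 (n : Nat) : ∀ c ∈ myBits n, c = '0' ∨ c = '1' := by
  induction n using Nat.strong_induction_on with
  | _ n ih =>
    by_cases h2 : n < 2
    · rw [myBits_lt_two h2]
      intro c hc
      simp at hc; subst hc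
      interval_cases n
      · left; rfl
      · right; rfl
    · rw [myBits_ge_two h2]
      intro c hc
      rcases List.mem_append.1 hc with hc | hc
      · exact ih (n / 2) (Nat.div_lt_self (by omega) one_lt_two) c hc
      · simp at hc; subst hc
        have : n % 2 = 0 ∨ n % 2 = 1 := Nat.mod_two_eq_zero_or_one n
        rcases this with h | h <;> rw [h]
        · left; rfl
        · right; rfl

theorem myBits_ne_nil (n : Nat) : myBits n ≠ [] := by
  by_cases h2 : n < 2
  · rw [myBits_lt_two h2]; simp
  · rw [myBits_ge_two h2]; simp

theorem myBits_len_le : ∀ (k n : Nat), 1 ≤ k → n < 2 ^ k → (myBits n).length ≤ k := by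
  intro k
  induction k with
  | zero => omega
  | succ k ih =>
    intro n _ hn
    by_cases h2 : n < 2
    · rw [myBits_lt_two h2]; simp
    · rw [myBits_ge_two h2]
      have hk : 1 ≤ k := by
        by_contra hk0
        have hk0' : k = 0 := by omega
        subst hk0'
        simp at hn; omega
      have hlt : n / 2 < 2 ^ k := by
        have : n < 2 ^ k * 2 := by rw [pow_succ] at hn; omega
        omega
      have := ih (n / 2) hk hlt
      simp
      omega

-- zfill on a digit-headed string is plain left zero-padding
theorem zfill_digits (cs : List Char) (w : Nat)
    (h : ∀ c ∈ cs, c = '0' ∨ c = '1') (hne : cs ≠ []) :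
    PySem.Chars.zfill cs (w : Int) = List.replicate (w - cs.length) '0' ++ cs := by
  rw [PySem.Chars.zfill.eq_def]
  by_cases hw : (w : Int) ≤ (cs.length : Int)
  · have : w - cs.length = 0 := by omega
    simp [hw, this]
  · simp only [hw, if_neg, if_false]
    match cs, hne with
    | c :: rest, _ =>
      have hc : c = '0' ∨ c = '1' := h c List.mem_cons_self
      have hns : ¬ (c = '+' ∨ c = '-') := by rcases hc with rfl | rfl <;> decide
      simp only [hns, if_neg, if_false]
      simp

theorem chStr_01 (c m : Nat) : ∀ x ∈ chStr c m, x = '0' ∨ x = '1' := by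
  intro x hx
  unfold chStr at hx
  rw [zfill_digits _ _ (myBits_01 m) (myBits_ne_nil m)] at hx
  rcases List.mem_append.1 hx with hx | hx
  · left; exact List.eq_of_mem_replicate hx
  · exact myBits_01 m x hx

theorem length_chStr (c m : Nat) (hc : 1 ≤ c) (hm : m < 2 ^ c) : (chStr c m).length = c := by
  unfold chStr
  rw [zfill_digits _ _ (myBits_01 m) (myBits_ne_nil m)]
  have := myBits_len_le c m hc hm
  simp
  omega

theorem chStr_lo (c m : Nat) (hc : 1 ≤ c) (hm : m < 2 ^ c) :
    chStr (c + 1) m = '0' :: chStr c m := by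
  unfold chStr
  rw [zfill_digits _ _ (myBits_01 m) (myBits_ne_nil m),
      zfill_digits _ _ (myBits_01 m) (myBits_ne_nil m)]
  have := myBits_len_le c m hc hm
  have h1 : c + 1 - (myBits m).length = (c - (myBits m).length) + 1 := by omega
  rw [h1, List.replicate_succ]
  simp

theorem chStr_snoc (c u : Nat) (hc : 1 ≤ c) (hu : u < 2 ^ (c + 1)) :
    chStr (c + 1) u = chStr c (u / 2) ++ [Nat.digitChar (u % 2)] := by
  unfold chStr
  rw [zfill_digits _ _ (myBits_01 u) (myBits_ne_nil u),
      zfill_digits _ _ (myBits_01 (u / 2)) (myBits_ne_nil (u / 2))]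
  by_cases h2 : u < 2
  · have hu2 : u / 2 = 0 := by omega
    have hm : u % 2 = u := by omega
    rw [hu2, hm, myBits_lt_two h2, myBits_lt_two (by omega : (0:Nat) < 2)]
    simp only [List.length_singleton]
    have h1 : c + 1 - 1 = (c - 1) + 1 := by omega
    have h0 : Nat.digitChar 0 = '0' := rfl
    rw [h1, h0, List.replicate_succ']
  · rw [myBits_ge_two h2]
    have hlen : (myBits (u / 2)).length ≤ c := by
      apply myBits_len_le c (u / 2) hc
      have : u < 2 ^ c * 2 := by rw [pow_succ] at hu; omega
      omega
    rw [List.length_append, List.length_singleton]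
    have h1 : c + 1 - ((myBits (u / 2)).length + 1) = c - (myBits (u / 2)).length := by omega
    rw [h1, ← List.append_assoc]

theorem myBits_pow_add : ∀ (c : Nat), 1 ≤ c → ∀ u < 2 ^ c, myBits (2 ^ c + u) = '1' :: chStr c u := by
  intro c
  induction c with
  | zero => omega
  | succ c ih =>
    intro _ u hu
    by_cases hc0 : c = 0
    · subst hc0
      have h2 : ¬ 2 ^ 1 + u < 2 := by omega
      have hd : (2 ^ 1 + u) / 2 = 1 := by omega
      have hm : (2 ^ 1 + u) % 2 = u := by omega
      rw [myBits_ge_two h2, hd, hm, myBits_lt_two (by omega : (1:Nat) < 2)]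
      have h1c : Nat.digitChar 1 = '1' := rfl
      rw [h1c]
      have hu2 : u < 2 := by simpa using hu
      rw [show chStr (0 + 1) u = PySem.Chars.zfill (myBits u) ((0 + 1 : Nat) : Int) from rfl]
      have hdig : ∀ x ∈ [u.digitChar], x = '0' ∨ x = '1' := by
        intro x hx; simp at hx; subst hx
        interval_cases u
        · exact Or.inl rfl
        · exact Or.inr rfl
      rw [myBits_lt_two hu2, zfill_digits _ _ hdig (by simp)]
      simp
    · have hc : 1 ≤ c := by omega
      have h2p : 2 ^ (c + 1) = 2 * 2 ^ c := by rw [pow_succ]; ring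
      have h2 : ¬ 2 ^ (c + 1) + u < 2 := by omega
      have hd : (2 ^ (c + 1) + u) / 2 = 2 ^ c + u / 2 := by omega
      have hm : (2 ^ (c + 1) + u) % 2 = u % 2 := by omega
      rw [myBits_ge_two h2, hd, hm, ih hc (u / 2) (by omega),
          chStr_snoc c u hc (by omega), List.cons_append]

theorem chStr_hi (c u : Nat) (hc : 1 ≤ c) (hu : u < 2 ^ c) :
    chStr (c + 1) (2 ^ c + u) = '1' :: chStr c u := by
  have hch : ∀ x ∈ '1' :: chStr c u, x = '0' ∨ x = '1' := by
    intro x hx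
    rcases List.mem_cons.1 hx with rfl | hx
    · right; rfl
    · exact chStr_01 c u x hx
  rw [show chStr (c + 1) (2 ^ c + u) = PySem.Chars.zfill (myBits (2 ^ c + u)) ((c + 1 : Nat) : Int) from rfl]
  rw [myBits_pow_add c hc u hu, zfill_digits _ _ hch (by simp)]
  have := length_chStr c u hc hu
  simp [this]

-- ---- position block ----

theorem posFrom_shift : ∀ (s : List Char) (k : Nat), posFrom s k = (posFrom s 0).map (k + ·) := by
  intro s
  induction s with
  | nil => intro k; simp [posFrom]
  | cons c t ih =>
    intro k
    simp only [posFrom]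
    rw [ih (k + 1), ih 1]
    by_cases hc : c = '1'
    · subst hc
      simp only [reduceIte, List.map_cons, List.map_map, Nat.add_zero]
      congr 1
      apply List.map_congr_left
      intro a _
      simp [Function.comp]
      omega
    · rw [if_neg hc, if_neg hc, List.map_map]
      apply List.map_congr_left
      intro a _
      simp [Function.comp]
      omega

theorem mem_posFrom : ∀ (s : List Char) (k q : Nat),
    q ∈ posFrom s k ↔ ∃ i, ∃ h : i < s.length, s[i] = '1' ∧ q = k + i := by
  intro s
  induction s with
  | nil => intro k q; simp [posFrom]
  | cons c t ih =>
    intro k q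
    by_cases hc : c = '1'
    · subst hc
      simp only [posFrom, reduceIte, List.mem_cons]
      constructor
      · rintro (rfl | hq)
        · exact ⟨0, by simp, by simp, by omega⟩
        · obtain ⟨i, hi, h1, rfl⟩ := (ih (k + 1) q).1 hq
          refine ⟨i + 1, by simp; omega, by simpa using h1, by omega⟩
      · rintro ⟨i, hi, h1, rfl⟩
        match i, hi, h1 with
        | 0, _, _ => left; omega
        | i + 1, hi, h1 =>
          right
          refine (ih (k + 1) (k + (i + 1))).2 ⟨i, by simp at hi; omega, by simpa using h1, by omega⟩
    · simp only [posFrom]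
      rw [if_neg hc]
      constructor
      · intro hq
        obtain ⟨i, hi, h1, rfl⟩ := (ih (k + 1) q).1 hq
        refine ⟨i + 1, by simp; omega, by simpa using h1, by omega⟩
      · rintro ⟨i, hi, h1, rfl⟩
        match i, hi, h1 with
        | 0, _, h1 => exact absurd (by simpa using h1) hc
        | i + 1, hi, h1 =>
          exact (ih (k + 1) (k + (i + 1))).2 ⟨i, by simp at hi; omega, by simpa using h1, by omega⟩

theorem posFrom_ge : ∀ (s : List Char) (k : Nat), ∀ q ∈ posFrom s k, k ≤ q := by
  intro s k q hq
  obtain ⟨i, hi, h1, rfl⟩ := (mem_posFrom s k q).1 hq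
  omega

theorem posFrom_lt : ∀ (s : List Char) (k : Nat), ∀ q ∈ posFrom s k, q < k + s.length := by
  intro s k q hq
  obtain ⟨i, hi, h1, rfl⟩ := (mem_posFrom s k q).1 hq
  omega

theorem posFrom_sorted : ∀ (s : List Char) (k : Nat), (posFrom s k).Pairwise (· < ·) := by
  intro s
  induction s with
  | nil => intro k; simp [posFrom]
  | cons c t ih =>
    intro k
    simp only [posFrom]
    by_cases hc : c = '1'
    · rw [if_pos hc]
      refine List.Pairwise.cons ?_ (ih (k + 1))
      intro q hq
      have := posFrom_ge t (k + 1) q hq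
      omega
    · rw [if_neg hc]
      exact ih (k + 1)

theorem posFrom_append : ∀ (s t : List Char) (k : Nat),
    posFrom (s ++ t) k = posFrom s k ++ posFrom t (k + s.length) := by
  intro s
  induction s with
  | nil => intro t k; simp [posFrom]
  | cons c s ih =>
    intro t k
    simp only [List.cons_append, posFrom, ih]
    have : k + 1 + s.length = k + (s.length + 1) := by omega
    by_cases hc : c = '1' <;> simp [hc, this]

theorem posFrom_drop (s : List Char) (j : Nat) (hj : j ≤ s.length) :
    posFrom (s.drop j) j = (posFrom s 0).filter (fun q => decide (j ≤ q)) := by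
  have hsplit : posFrom s 0 =
      posFrom (s.take j) 0 ++ posFrom (s.drop j) j := by
    conv_lhs => rw [← List.take_append_drop j s]
    rw [posFrom_append, List.length_take, Nat.zero_add, Nat.min_eq_left hj]
  rw [hsplit, List.filter_append]
  have h1 : (posFrom (s.take j) 0).filter (fun q => decide (j ≤ q)) = [] := by
    apply List.filter_eq_nil_iff.2
    intro q hq
    have := posFrom_lt _ _ q hq
    simp only [List.length_take] at this
    simp
    omega
  have h2 : (posFrom (s.drop j) j).filter (fun q => decide (j ≤ q)) = posFrom (s.drop j) j := by
    apply List.filter_eq_self.2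
    intro q hq
    have := posFrom_ge _ _ q hq
    simpa using this
  rw [h1, h2]
  simp

-- sorted-list helper: everything strictly above the k-th element is the (k+1)-tail
theorem sorted_filter_gt : ∀ (l : List Nat), l.Pairwise (· < ·) → ∀ (k : Nat) (h : k < l.length),
    l.filter (fun q => decide (l[k] < q)) = l.drop (k + 1) := by
  intro l
  induction l with
  | nil => intro _ k h; simp at h
  | cons a t ih =>
    intro hp k h
    match k with
    | 0 =>
      simp only [List.getElem_cons_zero, List.drop_succ_cons, List.drop_zero]
      rw [List.filter_cons]
      have ha : ¬ (a < a) := lt_irrefl a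
      simp only [ha, decide_false, if_false]
      apply List.filter_eq_self.2
      intro q hq
      have := (List.pairwise_cons.1 hp).1 q hq
      simpa using this
    | k + 1 =>
      simp only [List.getElem_cons_succ, List.drop_succ_cons]
      rw [List.filter_cons]
      have hk : k < t.length := by simpa using h
      have hlt : a < t[k] := (List.pairwise_cons.1 hp).1 _ (List.getElem_mem hk)
      have ha : ¬ (t[k] < a) := by omega
      simp only [ha, decide_false, if_false]
      exact ih (List.pairwise_cons.1 hp).2 k hk

-- ---- find block ----

theorem go_find : ∀ (s : List Char) (k : Nat),
    PySem.Chars.find.go ['1'] s k = (match posFrom s k with | [] => -1 | q :: _ => (q : Int)) := by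
  intro s
  induction s with
  | nil =>
    intro k
    rw [PySem.Chars.find.go]
    simp [posFrom]
  | cons c t ih =>
    intro k
    rw [PySem.Chars.find.go]
    by_cases hc : c = '1'
    · subst hc
      have hp : List.isPrefixOf ['1'] ('1' :: t) = true := by simp [List.isPrefixOf]
      simp [hp, posFrom]
    · have hp : List.isPrefixOf ['1'] (c :: t) = false := by
        simp [List.isPrefixOf]
        exact fun h => hc h.symm
      simp only [posFrom, hp, Bool.false_eq_true, if_false]
      rw [if_neg hc]
      exact ih (k + 1)

theorem find_posFrom (s : List Char) :
    PySem.Chars.find s ['1'] = (match posFrom s 0 with | [] => -1 | q :: _ => (q : Int)) := by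
  rw [show PySem.Chars.find s ['1'] = PySem.Chars.find.go ['1'] s 0 from rfl, go_find]

theorem findFrom_next (s : List Char) (j : Nat) (hj : j ≤ s.length) :
    PySem.Chars.findFrom s ['1'] (j : Int) none =
      (match posFrom (s.drop j) j with | [] => -1 | q :: _ => (q : Int)) := by
  rw [PySem.Chars.findFrom_natCast s ['1'] j hj, find_posFrom]
  have hshift := posFrom_shift (s.drop j) j
  cases h : posFrom (s.drop j) 0 with
  | nil =>
    rw [h] at hshift
    simp [hshift, h]
  | cons q rest =>
    rw [h] at hshift
    simp only [h, hshift, List.map_cons]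
    have hq : ¬ ((q : Int) = -1) := by omega
    rw [if_neg hq]
    push_cast
    ring

-- ---- count block ----

theorem countgo : ∀ (fuel : Nat) (s : List Char) (acc : Nat), s.length ≤ fuel →
    PySem.Chars.count.go ['1'] fuel s acc = acc + (posFrom s 0).length := by
  intro fuel
  induction fuel with
  | zero =>
    intro s acc h
    have hs : s = [] := List.eq_nil_of_length_eq_zero (by omega)
    subst hs
    rw [PySem.Chars.count.go]
    simp [posFrom]
  | succ fuel ih =>
    intro s acc h
    cases s with
    | nil =>
      rw [PySem.Chars.count.go]
      simp [posFrom]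
      omega
    | cons c t =>
      rw [PySem.Chars.count.go]
      have hlen : (posFrom (c :: t) 0).length = (if c = '1' then 1 else 0) + (posFrom t 0).length := by
        simp only [posFrom]
        by_cases hc : c = '1'
        · rw [if_pos hc, if_pos hc, posFrom_shift t 1]
          simp
          omega
        · rw [if_neg hc, if_neg hc, posFrom_shift t 1]
          simp
      by_cases hc : c = '1'
      · subst hc
        have hp : List.isPrefixOf ['1'] ('1' :: t) = true := by simp [List.isPrefixOf]
        rw [hlen]
        simp only [hp, if_true, if_pos]
        have hd : List.drop (['1'] : List Char).length ('1' :: t) = t := by simp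
        rw [hd, ih t (acc + 1) (by simpa using h)]
        omega
      · have hp : List.isPrefixOf ['1'] (c :: t) = false := by
          simp [List.isPrefixOf]
          exact fun hcc => hc hcc.symm
        rw [hlen]
        simp only [hp, Bool.false_eq_true, if_false]
        rw [ih t acc (by simpa using h), if_neg hc]
        omega

theorem count_one (s : List Char) : PySem.Chars.count s ['1'] = (posFrom s 0).length := by
  rw [PySem.Chars.count]
  have : (['1'] : List Char).isEmpty = false := rfl
  rw [this]
  simp only [Bool.false_eq_true, if_false]
  rw [countgo s.length s 0 le_rfl]
  omega

-- ---- fb block ----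

theorem fb_fold (s : List Char) (hcnt : 1 ≤ (posFrom s 0).length) :
    (PySem.List.pyRange 0 (((posFrom s 0).length : Int) - 1) 1).foldl
      (fun fb _i => fb ++ [PySem.Chars.findFrom s ['1'] (PySem.List.pyGetD fb (-1) 0 + 1) none])
      [PySem.Chars.find s ['1']]
    = (posFrom s 0).map (fun (q : Nat) => (q : Int)) := by
  have hne : posFrom s 0 ≠ [] := by
    intro h; rw [h] at hcnt; simp at hcnt
  obtain ⟨q0, rest, hq⟩ := List.exists_cons_of_ne_nil hne
  have hfind : PySem.Chars.find s ['1'] = (q0 : Int) := by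
    rw [find_posFrom, hq]
  have aux : ∀ k, k < (posFrom s 0).length →
      (PySem.List.pyRange 0 ((k : Nat) : Int) 1).foldl
        (fun fb _i => fb ++ [PySem.Chars.findFrom s ['1'] (PySem.List.pyGetD fb (-1) 0 + 1) none])
        [PySem.Chars.find s ['1']]
      = ((posFrom s 0).take (k + 1)).map (fun (q : Nat) => (q : Int)) := by
    intro k
    induction k with
    | zero =>
      intro _
      rw [show ((0 : Nat) : Int) = 0 from rfl, PySem.List.pyRange_one_eq_nil le_rfl]
      rw [List.foldl_nil, hfind, hq]
      simp
    | succ k ih =>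
      intro hk1
      have hk : k < (posFrom s 0).length := by omega
      have hc1 : ((k + 1 : Nat) : Int) = ((k : Nat) : Int) + 1 := by push_cast; ring
      rw [hc1, PySem.List.pyRange_one_succ_right (by positivity), List.foldl_append,
        List.foldl_cons, List.foldl_nil, ih hk]
      have htk : (posFrom s 0).take (k + 1) = (posFrom s 0).take k ++ [(posFrom s 0)[k]'hk] := by
        rw [List.take_add_one, List.getElem?_eq_getElem hk]
        rfl
      have htk2 : (posFrom s 0).take (k + 2) =
          (posFrom s 0).take (k + 1) ++ [(posFrom s 0)[k + 1]'hk1] := by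
        rw [show k + 2 = (k + 1) + 1 from rfl, List.take_add_one, List.getElem?_eq_getElem hk1]
        rfl
      rw [htk, List.map_append]
      simp only [List.map_cons, List.map_nil]
      rw [PySem.List.pyGetD_neg_one_append_singleton]
      have hjle : (posFrom s 0)[k]'hk + 1 ≤ s.length := by
        have := posFrom_lt s 0 ((posFrom s 0)[k]'hk) (List.getElem_mem hk)
        omega
      have hcast : (((posFrom s 0)[k]'hk : Nat) : Int) + 1
          = (((posFrom s 0)[k]'hk + 1 : Nat) : Int) := by
        push_cast; ring
      rw [hcast, findFrom_next s ((posFrom s 0)[k]'hk + 1) hjle]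
      rw [posFrom_drop s ((posFrom s 0)[k]'hk + 1) hjle]
      have hfc : (posFrom s 0).filter (fun q => decide ((posFrom s 0)[k]'hk + 1 ≤ q))
          = (posFrom s 0).filter (fun q => decide ((posFrom s 0)[k]'hk < q)) := by
        apply List.filter_congr
        intro q _
        simp only [decide_eq_decide]
        omega
      rw [hfc, sorted_filter_gt _ (posFrom_sorted s 0) k hk]
      have hdrop : (posFrom s 0).drop (k + 1)
          = (posFrom s 0)[k + 1]'hk1 :: (posFrom s 0).drop (k + 2) :=
        List.drop_eq_getElem_cons hk1
      rw [hdrop, htk2, htk, List.map_append, List.map_append]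
      simp
  have hfin := aux ((posFrom s 0).length - 1) (by omega)
  have hc2 : (((posFrom s 0).length - 1 : Nat) : Int) = ((posFrom s 0).length : Int) - 1 := by
    omega
  rw [hc2] at hfin
  rw [hfin]
  congr 1
  apply List.take_of_length_le
  omega

-- ---- subst block ----

theorem substF_length : ∀ (ps : List Nat) (ch xs : List Char),
    (substF ps ch xs).length = xs.length := by
  intro ps
  induction ps with
  | nil => intro ch xs; cases ch <;> simp [substF]
  | cons p ps ih =>
    intro ch xs
    cases ch with
    | nil => simp [substF]
    | cons c ch => simp [substF, ih]

theorem substF_getElem?_not_mem : ∀ (ps : List Nat) (ch xs : List Char) (i : Nat), i ∉ ps →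
    (substF ps ch xs)[i]? = xs[i]? := by
  intro ps
  induction ps with
  | nil => intro ch xs i _; cases ch <;> simp [substF]
  | cons p ps ih =>
    intro ch xs i hi
    cases ch with
    | nil => simp [substF]
    | cons c ch =>
      simp only [substF]
      rw [ih ch _ i (fun h => hi (List.mem_cons_of_mem _ h))]
      have hpi : p ≠ i := fun h => hi (by rw [← h]; exact List.mem_cons_self)
      exact List.getElem?_set_ne hpi

theorem substF_01 : ∀ (ps : List Nat) (ch xs : List Char),
    (∀ c ∈ xs, c = '0' ∨ c = '1') → (∀ c ∈ ch, c = '0' ∨ c = '1') →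
    ∀ c ∈ substF ps ch xs, c = '0' ∨ c = '1' := by
  intro ps
  induction ps with
  | nil => intro ch xs hxs _ c hc; cases ch <;> simp [substF] at hc <;> exact hxs c hc
  | cons p ps ih =>
    intro ch xs hxs hch x hx
    cases ch with
    | nil => simp [substF] at hx; exact hxs x hx
    | cons c ch =>
      simp only [substF] at hx
      refine ih ch (xs.set p c) ?_ (fun y hy => hch y (List.mem_cons_of_mem _ hy)) x hx
      intro y hy
      rcases List.mem_or_eq_of_mem_set hy with hy | rfl
      · exact hxs y hy
      · exact hch y List.mem_cons_self

theorem substF_set_comm : ∀ (ps : List Nat) (ch xs : List Char) (p : Nat) (c : Char), p ∉ ps →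
    substF ps ch (xs.set p c) = (substF ps ch xs).set p c := by
  intro ps
  induction ps with
  | nil => intro ch xs p c _; cases ch <;> simp [substF]
  | cons q ps ih =>
    intro ch xs p c hp
    cases ch with
    | nil => simp [substF]
    | cons d ch =>
      simp only [substF]
      have hpq : p ≠ q := fun h => hp (by rw [h]; exact List.mem_cons_self)
      rw [List.set_comm c d hpq, ih ch _ p c (fun h => hp (List.mem_cons_of_mem _ h))]

theorem substF_append : ∀ (ps : List Nat) (ch : List Char) (hlen : ps.length = ch.length)
    (p : Nat) (c : Char) (xs : List Char),
    substF (ps ++ [p]) (ch ++ [c]) xs = (substF ps ch xs).set p c := by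
  intro ps
  induction ps with
  | nil =>
    intro ch hlen p c xs
    have : ch = [] := List.eq_nil_of_length_eq_zero (by simpa using hlen.symm)
    subst this
    simp [substF]
  | cons q ps ih =>
    intro ch hlen p c xs
    cases ch with
    | nil => simp at hlen
    | cons d ch =>
      simp only [List.cons_append, substF]
      exact ih ch (by simpa using hlen) p c (xs.set q d)

-- one step of A's inner loop is List.set
theorem step_set (alt : List Char) (L : Nat) (halt : alt.length = L) (i : Nat) (hi : i < L) (ch : Char) :
    (if (i : Int) = 0 then
        ch :: PySem.List.slice alt (some ((i : Int) + 1)) none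
      else if (i : Int) = (L : Int) - 1 then
        PySem.List.slice alt none (some (i : Int)) ++ [ch]
      else
        PySem.List.slice alt none (some (i : Int)) ++
          ch :: PySem.List.slice alt (some ((i : Int) + 1)) none)
    = alt.set i ch := by
  have hset : alt.set i ch = alt.take i ++ ch :: alt.drop (i + 1) :=
    List.set_eq_take_cons_drop ch (by omega)
  by_cases h0 : (i : Int) = 0
  · have hi0 : i = 0 := by exact_mod_cast h0
    subst hi0
    rw [if_pos h0]
    have h1 : ((0 : Nat) : Int) + 1 = ((1 : Nat) : Int) := by norm_num
    rw [h1, PySem.List.slice_from_natCast]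
    rw [hset]
    simp
  · rw [if_neg h0]
    have hi0 : 0 < i := by
      rcases Nat.eq_zero_or_pos i with rfl | h
      · simp at h0
      · exact h
    by_cases hL : (i : Int) = (L : Int) - 1
    · have hiL : i = L - 1 := by omega
      rw [if_pos hL]
      rw [PySem.List.slice_to_natCast alt i]
      rw [hset]
      have hnil : alt.drop (i + 1) = [] := by
        apply List.drop_eq_nil_of_le
        omega
      rw [hnil]
    · rw [if_neg hL]
      have hiL : i < L - 1 := by omega
      rw [PySem.List.slice_to_natCast alt i]
      have h1 : (i : Int) + 1 = ((i + 1 : Nat) : Int) := by push_cast; ring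
      rw [h1, PySem.List.slice_from_natCast, hset]

-- A's inner loop = substF
theorem alt_fold (s changes : List Char) (pos : List Nat)
    (hL : ∀ p ∈ pos, p < s.length) (hch : pos.length ≤ changes.length) :
    (PySem.List.pyRange 0 ((pos.length : Nat) : Int) 1).foldl
      (fun alteration bit =>
        let i : Int := PySem.List.pyGetD (pos.map (fun (q : Nat) => (q : Int))) bit 0
        if i = 0 then
          PySem.List.pyGetD changes bit ' ' :: PySem.List.slice alteration (some (i + 1)) none
        else if i = (PySem.List.len s) - 1 then
          PySem.List.slice alteration none (some i) ++ [PySem.List.pyGetD changes bit ' ']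
        else
          PySem.List.slice alteration none (some i) ++
            PySem.List.pyGetD changes bit ' ' :: PySem.List.slice alteration (some (i + 1)) none)
      s
    = substF pos (changes.take pos.length) s := by
  have aux : ∀ k, k ≤ pos.length →
      (PySem.List.pyRange 0 ((k : Nat) : Int) 1).foldl
        (fun alteration bit =>
          let i : Int := PySem.List.pyGetD (pos.map (fun (q : Nat) => (q : Int))) bit 0
          if i = 0 then
            PySem.List.pyGetD changes bit ' ' :: PySem.List.slice alteration (some (i + 1)) none
          else if i = (PySem.List.len s) - 1 then
            PySem.List.slice alteration none (some i) ++ [PySem.List.pyGetD changes bit ' ']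
          else
            PySem.List.slice alteration none (some i) ++
              PySem.List.pyGetD changes bit ' ' :: PySem.List.slice alteration (some (i + 1)) none)
        s
      = substF (pos.take k) (changes.take k) s := by
    intro k
    induction k with
    | zero =>
      intro _
      rw [show ((0 : Nat) : Int) = 0 from rfl, PySem.List.pyRange_one_eq_nil le_rfl]
      simp [substF]
    | succ k ih =>
      intro hk1
      have hk : k < pos.length := by omega
      have hkc : k < changes.length := by omega
      have hc1 : ((k + 1 : Nat) : Int) = ((k : Nat) : Int) + 1 := by push_cast; ring
      rw [hc1, PySem.List.pyRange_one_succ_right (by positivity), List.foldl_append,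
        List.foldl_cons, List.foldl_nil, ih (by omega)]
      simp only []
      have hgi : PySem.List.pyGetD (pos.map (fun (q : Nat) => (q : Int))) ((k : Nat) : Int) 0
          = ((pos[k]'hk : Nat) : Int) := by
        rw [PySem.List.pyGetD_natCast]
        simp [List.getD, List.getElem?_map, List.getElem?_eq_getElem hk]
      have hgc : PySem.List.pyGetD changes ((k : Nat) : Int) ' ' = changes[k]'hkc := by
        rw [PySem.List.pyGetD_natCast]
        simp [List.getD, List.getElem?_eq_getElem hkc]
      rw [hgi, hgc, PySem.List.len_eq]
      have hlen : (substF (pos.take k) (changes.take k) s).length = s.length :=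
        substF_length _ _ _
      have hplt : pos[k]'hk < s.length := hL _ (List.getElem_mem hk)
      rw [step_set _ s.length hlen _ hplt]
      have htkp : pos.take (k + 1) = pos.take k ++ [pos[k]'hk] := by
        rw [List.take_add_one, List.getElem?_eq_getElem hk]
        rfl
      have htkc : changes.take (k + 1) = changes.take k ++ [changes[k]'hkc] := by
        rw [List.take_add_one, List.getElem?_eq_getElem hkc]
        rfl
      rw [htkp, htkc, substF_append _ _ (by simp [List.length_take]; omega)]
  have hfin := aux pos.length le_rfl
  rw [List.take_of_length_le le_rfl] at hfin
  exact hfin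

-- ---- binval block ----

theorem binvalN_acc (l : List Char) (a : Nat) :
    l.foldl step01 a = a * 2 ^ l.length + binvalN l := by
  induction l generalizing a with
  | nil => simp [binvalN]
  | cons c l ih =>
    rw [List.foldl_cons, ih (step01 a c)]
    have hb : binvalN (c :: l) = (step01 0 c) * 2 ^ l.length + binvalN l := by
      rw [show binvalN (c :: l) = List.foldl step01 (step01 0 c) l from rfl, ih (step01 0 c)]
    rw [hb]
    simp only [List.length_cons, pow_succ, step01]
    ring

theorem binvalN_append (l1 l2 : List Char) :
    binvalN (l1 ++ l2) = binvalN l1 * 2 ^ l2.length + binvalN l2 := by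
  rw [show binvalN (l1 ++ l2) = List.foldl step01 0 (l1 ++ l2) from rfl, List.foldl_append,
      binvalN_acc l2 _]
  rfl

theorem binvalN_zero (xs : List Char) (h : ∀ i, (hi : i < xs.length) → xs[i] ≠ '1') :
    binvalN xs = 0 := by
  induction xs with
  | nil => rfl
  | cons c t ih =>
    have hc : c ≠ '1' := by have := h 0 (by simp); simpa using this
    have h0 : step01 0 c = 0 := by simp [step01, hc]
    rw [show binvalN (c :: t) = List.foldl step01 (step01 0 c) t from rfl, h0,
        show List.foldl step01 0 t = binvalN t from rfl]
    apply ih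
    intro i hi
    have := h (i + 1) (by simpa using Nat.succ_lt_succ hi)
    simpa using this

theorem binvalN_set_one (ys : List Char) (p : Nat) (hp : p < ys.length) (h : ys[p] ≠ '1') :
    binvalN (ys.set p '1') = binvalN ys + 2 ^ (ys.length - 1 - p) := by
  have hdecomp : ys.set p '1' = ys.take p ++ '1' :: ys.drop (p + 1) :=
    List.set_eq_take_cons_drop '1' hp
  have hy : ys = ys.take p ++ ys[p] :: ys.drop (p + 1) := by
    conv_lhs => rw [← List.take_append_drop p ys]
    congr 1
    exact List.drop_eq_getElem_cons hp
  have hcons : ∀ (c : Char) (l : List Char),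
      binvalN (c :: l) = (if c = '1' then 1 else 0) * 2 ^ l.length + binvalN l := by
    intro c l
    rw [show binvalN (c :: l) = List.foldl step01 (step01 0 c) l from rfl, binvalN_acc]
    simp [step01]
  rw [hdecomp, binvalN_append]
  conv_rhs => rw [hy, binvalN_append]
  rw [hcons, hcons]
  rw [if_pos rfl, if_neg h]
  have hlen2 : (List.take p ys ++ ys[p] :: List.drop (p + 1) ys).length = ys.length := by
    rw [← hy]
  rw [hlen2]
  have hexp : ys.length - 1 - p = (ys.drop (p + 1)).length := by
    simp [List.length_drop]
    omega
  rw [hexp]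
  simp only [List.length_cons]
  ring

-- ---- main A-side characterization ----

theorem Gmain : ∀ (ps : List Nat) (xs : List Char),
    ps.Pairwise (· < ·) → (∀ p ∈ ps, p < xs.length) →
    (∀ i, (hi : i < xs.length) → i ∉ ps → xs[i] ≠ '1') →
    (List.range (2 ^ ps.length)).map (fun m => binvalN (substF ps (chStr ps.length m) xs))
      = expected (ps.map (fun p => 2 ^ (xs.length - 1 - p))) := by
  intro ps
  induction ps with
  | nil =>
    intro xs _ _ h0
    have hz : binvalN (substF [] (chStr 0 0) xs) = 0 := by
      rw [show substF [] (chStr 0 0) xs = xs from rfl]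
      exact binvalN_zero xs (fun i hi => h0 i hi (List.not_mem_nil (a := i)))
    simp [expected, hz]
  | cons p ps ih =>
    intro xs hsort hlt h0
    have hplen : p < xs.length := hlt p List.mem_cons_self
    have hpnot : p ∉ ps := by
      intro hmem
      have := (List.pairwise_cons.1 hsort).1 p hmem
      omega
    by_cases hps : ps = []
    · subst hps
      have hch0 : chStr 1 0 = ['0'] := by
        unfold chStr
        rw [myBits_lt_two (by omega : (0:Nat) < 2)]
        decide
      have hch1 : chStr 1 1 = ['1'] := by
        unfold chStr
        rw [myBits_lt_two (by omega : (1:Nat) < 2)]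
        decide
      have hs0 : ∀ i, (hi : i < xs.length) → i ≠ p → xs[i] ≠ '1' := by
        intro i hi hip
        exact h0 i hi (by simp [hip])
      have hb0 : binvalN (xs.set p '0') = 0 := by
        apply binvalN_zero
        intro i hi
        rw [List.getElem_set]
        by_cases hip : p = i
        · simp [hip]
        · simp only [hip, if_false]
          exact hs0 i (by simpa using hi) (fun h => hip h.symm)
      have hb1 : binvalN (xs.set p '1') = 2 ^ (xs.length - 1 - p) := by
        rw [show xs.set p '1' = (xs.set p '0').set p '1' from by rw [List.set_set]]
        rw [binvalN_set_one _ p (by simpa using hplen) (by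
          rw [List.getElem_set]
          simp)]
        rw [hb0, List.length_set]
        omega
      rw [show (List.range (2 ^ ([p] : List Nat).length)) = [0, 1] from rfl]
      simp only [List.map_cons, List.map_nil]
      rw [show ([p] : List Nat).length = 1 from rfl, hch0, hch1]
      rw [show substF [p] ['0'] xs = xs.set p '0' from rfl,
          show substF [p] ['1'] xs = xs.set p '1' from rfl]
      rw [hb0, hb1]
      simp [expected]
    · have hc' : 1 ≤ ps.length := by
        cases ps with
        | nil => exact absurd rfl hps
        | cons a b => simp
      have hsplit : List.range (2 ^ (ps.length + 1))
          = List.range (2 ^ ps.length) ++ (List.range (2 ^ ps.length)).map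
              (fun u => 2 ^ ps.length + u) := by
        have h2 : 2 ^ (ps.length + 1) = 2 ^ ps.length + 2 ^ ps.length := by
          rw [pow_succ]; ring
        rw [h2, List.range_add]
      rw [show (p :: ps).length = ps.length + 1 from rfl, hsplit, List.map_append, List.map_map]
      have hh1 : ∀ m ∈ List.range (2 ^ ps.length),
          binvalN (substF (p :: ps) (chStr (ps.length + 1) m) xs)
            = binvalN (substF ps (chStr ps.length m) (xs.set p '0')) := by
        intro m hm
        rw [chStr_lo ps.length m hc' (List.mem_range.1 hm)]
        rfl
      have hh2 : ∀ u ∈ List.range (2 ^ ps.length),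
          binvalN (substF (p :: ps) (chStr (ps.length + 1) (2 ^ ps.length + u)) xs)
            = binvalN (substF ps (chStr ps.length u) (xs.set p '0')) + 2 ^ (xs.length - 1 - p) := by
        intro u hu
        rw [chStr_hi ps.length u hc' (List.mem_range.1 hu)]
        rw [show substF (p :: ps) ('1' :: chStr ps.length u) xs
              = substF ps (chStr ps.length u) (xs.set p '1') from rfl]
        rw [show xs.set p '1' = (xs.set p '0').set p '1' from by rw [List.set_set]]
        rw [substF_set_comm ps _ _ p '1' hpnot]
        have hYlen : (substF ps (chStr ps.length u) (xs.set p '0')).length = xs.length := by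
          rw [substF_length, List.length_set]
        have hYp : (substF ps (chStr ps.length u) (xs.set p '0'))[p]'(by omega) ≠ '1' := by
          have hq := substF_getElem?_not_mem ps (chStr ps.length u) (xs.set p '0') p hpnot
          have h2 : (xs.set p '0')[p]? = some '0' := by
            rw [List.getElem?_set_self (by simpa using hplen)]
          have h3 := List.getElem?_eq_getElem (l := substF ps (chStr ps.length u) (xs.set p '0'))
            (i := p) (by omega)
          rw [hq, h2] at h3
          have h4 : (substF ps (chStr ps.length u) (xs.set p '0'))[p]'(by omega) = '0' :=
            (Option.some.inj h3).symm
          rw [h4]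
          decide
        rw [binvalN_set_one _ p (by omega) hYp, hYlen]
      rw [List.map_congr_left hh1]
      have hmm : (List.range (2 ^ ps.length)).map
            ((fun m => binvalN (substF (p :: ps) (chStr (ps.length + 1) m) xs)) ∘
              (fun u => 2 ^ ps.length + u))
          = (List.range (2 ^ ps.length)).map
            (fun u => binvalN (substF ps (chStr ps.length u) (xs.set p '0'))
              + 2 ^ (xs.length - 1 - p)) :=
        List.map_congr_left (fun u hu => hh2 u hu)
      rw [hmm]
      have hih := ih (xs.set p '0') (List.pairwise_cons.1 hsort).2
        (fun q hq => by rw [List.length_set]; exact hlt q (List.mem_cons_of_mem _ hq))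
        (by
          intro i hi hnot
          rw [List.getElem_set]
          by_cases hip : p = i
          · simp [hip]
          · simp only [hip, if_false]
            exact h0 i (by simpa using hi) (by
              intro hmem
              rcases List.mem_cons.1 hmem with hq | hq
              · exact hip hq.symm
              · exact hnot hq))
      have hlenset : (xs.set p '0').length = xs.length := List.length_set ..
      rw [hlenset] at hih
      rw [hih]
      have hsnd : (List.range (2 ^ ps.length)).map
            (fun u => binvalN (substF ps (chStr ps.length u) (xs.set p '0'))
              + 2 ^ (xs.length - 1 - p))
          = ((List.range (2 ^ ps.length)).map
              (fun u => binvalN (substF ps (chStr ps.length u) (xs.set p '0')))).map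
              (· + 2 ^ (xs.length - 1 - p)) := by
        rw [List.map_map]
        rfl
      rw [hsnd, hih]
      rw [List.map_cons]
      rfl

-- ---- B-side block ----

theorem expected_foldl : ∀ (vs : List Nat),
    vs.reverse.foldl (fun a v => a ++ a.map (· + v)) [0] = expected vs := by
  intro vs
  induction vs with
  | nil => rfl
  | cons v vs ih =>
    simp only [List.reverse_cons, List.foldl_append, ih, List.foldl_cons, List.foldl_nil, expected]

theorem foldl_guard_filter : ∀ (l : List Nat) (guard : Nat → Bool) (v : Nat → Int) (init : List Int),
    l.foldl (fun a p => if guard p then a ++ a.map (· + v p) else a) init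
      = ((l.filter guard).map v).foldl (fun a w => a ++ a.map (· + w)) init := by
  intro l
  induction l with
  | nil => intro guard v init; rfl
  | cons p l ih =>
    intro guard v init
    cases hg : guard p <;>
      simp [List.filter_cons, hg, List.foldl_cons, ih]

theorem foldl_dbl_cast : ∀ (ws : List Nat) (base : Int) (accN : List Nat),
    (ws.map (fun w : Nat => (w : Int))).foldl (fun a w => a ++ a.map (· + w))
        (accN.map (fun v : Nat => base + (v : Int)))
      = ((ws.foldl (fun a w => a ++ a.map (· + w)) accN).map (fun v : Nat => base + (v : Int))) := by
  intro ws
  induction ws with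
  | nil => intro base accN; rfl
  | cons w ws ih =>
    intro base accN
    rw [List.map_cons, List.foldl_cons, List.foldl_cons]
    rw [show (accN.map (fun v : Nat => base + (v : Int)) ++
          (accN.map (fun v : Nat => base + (v : Int))).map (· + (w : Int)))
        = (accN ++ accN.map (· + w)).map (fun v : Nat => base + (v : Int)) by
      rw [List.map_append, List.map_map, List.map_map]
      congr 1
      apply List.map_congr_left
      intro a _
      simp [Function.comp]
      push_cast
      ring]
    exact ih base _

theorem corr : ∀ F : Nat,
    (posFrom (myBits F) 0).map (fun p => 2 ^ ((myBits F).length - 1 - p))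
      = (((List.range (PySem.Int.bitLength (F : Int))).filter (fun p => F.testBit p)).map
          (fun p => 2 ^ p)).reverse := by
  intro F
  induction F using Nat.strong_induction_on with
  | _ F ih =>
    by_cases h2 : F < 2
    · interval_cases F
      · rw [myBits_lt_two (by omega)]
        decide
      · rw [myBits_lt_two (by omega)]
        decide
    · have hF : 0 < F := by omega
      have ih2 := ih (F / 2) (Nat.div_lt_self hF one_lt_two)
      rw [myBits_ge_two h2, PySem.Int.bitLength_natCast hF]
      set ys := myBits (F / 2) with hys
      set L : List Nat := (List.range (PySem.Int.bitLength ((F / 2 : Nat) : Int))).filter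
        (fun p => (F / 2).testBit p) with hL
      have hypos : 1 ≤ ys.length := List.length_pos_of_ne_nil (myBits_ne_nil (F / 2))
      -- LHS
      rw [posFrom_append]
      have hlen : (ys ++ [(F % 2).digitChar]).length = ys.length + 1 := by simp
      rw [hlen, List.map_append]
      have hA : (posFrom ys 0).map (fun p => 2 ^ (ys.length + 1 - 1 - p))
          = ((posFrom ys 0).map (fun p => 2 ^ (ys.length - 1 - p))).map (fun v => 2 * v) := by
        rw [List.map_map]
        apply List.map_congr_left
        intro q hq
        have hq2 := posFrom_lt ys 0 q hq
        simp only [Function.comp]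
        rw [show ys.length + 1 - 1 - q = (ys.length - 1 - q) + 1 by omega, pow_succ]
        ring
      rw [hA, ih2]
      -- RHS
      rw [List.range_succ_eq_map, List.filter_cons]
      have hfm : (List.filter (fun p => F.testBit p)
            ((List.range (PySem.Int.bitLength ((F / 2 : Nat) : Int))).map (fun i => i + 1)))
          = L.map (fun i => i + 1) := by
        rw [List.filter_map, hL]
        congr 1
        apply List.filter_congr
        intro p _
        simp [Function.comp, Nat.testBit_add_one]
      have htail : ((L.map (fun i => i + 1)).map (fun p => 2 ^ p)).reverse
          = ((L.map (fun p => 2 ^ p)).reverse).map (fun v => 2 * v) := by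
        rw [List.map_map, ← List.map_reverse, ← List.map_reverse, List.map_map]
        apply List.map_congr_left
        intro q _
        simp [Function.comp, pow_succ]
        ring
      have hmod : F % 2 = 0 ∨ F % 2 = 1 := Nat.mod_two_eq_zero_or_one F
      by_cases htb : F.testBit 0
      · have h1 : F % 2 = 1 := by
          rcases hmod with h | h
          · exfalso; rw [Nat.testBit_zero, h] at htb; simp at htb
          · exact h
        have hdig : posFrom [(F % 2).digitChar] (0 + ys.length) = [0 + ys.length] := by
          rw [h1]; simp [posFrom, Nat.digitChar]
        rw [hdig]
        simp only [htb, if_true, hfm, List.map_cons, List.map_nil, List.reverse_cons, htail]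
        simp
      · have h1 : F % 2 = 0 := by
          rcases hmod with h | h
          · exact h
          · exfalso; rw [Nat.testBit_zero, h] at htb; simp at htb
        have hdig : posFrom [(F % 2).digitChar] (0 + ys.length) = [] := by
          rw [h1]; simp [posFrom, Nat.digitChar]
        rw [hdig]
        simp only [htb, Bool.false_eq_true, if_false, hfm]
        rw [htail]
        simp


theorem band_shift_testBit (F p : Nat) :
    (PySem.Int.band ((F : Int) >>> p) 1 = 1) ↔ F.testBit p := by
  have hc : ((F : Int) >>> p) = ((F >>> p : Nat) : Int) := rfl
  rw [hc, show (1 : Int) = ((1 : Nat) : Int) from rfl, PySem.Int.band_natCast]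
  constructor
  · intro h
    have : (F >>> p) &&& 1 = 1 := by exact_mod_cast h
    simp [Nat.testBit, Nat.and_one_is_mod, Nat.shiftRight_eq_div_pow] at this ⊢
    omega
  · intro h
    simp [Nat.testBit, Nat.and_one_is_mod, Nat.shiftRight_eq_div_pow] at h
    have : (F >>> p) &&& 1 = 1 := by
      simp [Nat.and_one_is_mod, Nat.shiftRight_eq_div_pow]
      omega
    exact_mod_cast this

theorem one_shl (p : Nat) : ((1 : Int) <<< p) = ((2 ^ p : Nat) : Int) := by
  rw [Int.shiftLeft_eq]
  push_cast
  ring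

-- ---- assembly ----

-- ---- A-side assembly helpers ----

theorem toBinChars_natCast (m : Nat) : PySem.Int.toBinChars (m : Int) = myBits m := by
  simp [PySem.Int.toBinChars, toDigits_two]

theorem fl_eq (F : Nat) :
    PySem.List.slice (PySem.Int.pyBin ((F : Nat) : Int)).toList (some 2) none = myBits F := by
  rw [show (PySem.Int.pyBin ((F : Nat) : Int)).toList = PySem.Int.toBinChars0b (F : Int) from
      PySem.Int.toList_pyBin _]
  have h1 : PySem.Int.toBinChars0b (F : Int) = '0' :: 'b' :: Nat.toDigits 2 F := by
    simp [PySem.Int.toBinChars0b, show ¬ ((F : Int) < 0) by exact not_lt.2 (Int.natCast_nonneg F)]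
  rw [h1, show (2 : Int) = ((2 : Nat) : Int) from rfl, PySem.List.slice_from_natCast,
      toDigits_two]
  rfl

theorem binval_myBits (F : Nat) : binvalN (myBits F) = F := by
  induction F using Nat.strong_induction_on with
  | _ F ih =>
    by_cases h2 : F < 2
    · rw [myBits_lt_two h2]
      interval_cases F <;> decide
    · rw [myBits_ge_two h2, binvalN_append, ih (F / 2) (Nat.div_lt_self (by omega) one_lt_two)]
      have hm : F % 2 = 0 ∨ F % 2 = 1 := Nat.mod_two_eq_zero_or_one F
      rcases hm with hm | hm <;> rw [hm] <;> simp [binvalN, step01, Nat.digitChar] <;> omega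

theorem pos_ne_nil (F : Nat) (hF : 1 ≤ F) : posFrom (myBits F) 0 ≠ [] := by
  intro hnil
  have hz : binvalN (myBits F) = 0 := by
    apply binvalN_zero
    intro i hi h1
    have : (i : Nat) ∈ posFrom (myBits F) 0 := (mem_posFrom _ 0 i).2 ⟨i, hi, h1, by omega⟩
    rw [hnil] at this
    exact absurd this (List.not_mem_nil)
  rw [binval_myBits] at hz
  omega

theorem A_char (num fixed : Int) (F : Nat) (hF : 1 ≤ F) :
    update_address num fixed (F : Int)
      = ((List.range (2 ^ (posFrom (myBits F) 0).length)).map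
          (fun m => binvalN (substF (posFrom (myBits F) 0)
            (chStr (posFrom (myBits F) 0).length m) (myBits F)))).map
          (fun v : Nat => PySem.Int.bor (PySem.Int.band num (Int.not (F : Int))) fixed + (v : Int)) := by
  have hcnt : 1 ≤ (posFrom (myBits F) 0).length :=
    List.length_pos_of_ne_nil (pos_ne_nil F hF)
  simp only [update_address, fl_eq, count_one]
  rw [fb_fold (myBits F) hcnt]
  rw [show ((2 : Int)) ^ (posFrom (myBits F) 0).length
        = ((2 ^ (posFrom (myBits F) 0).length : Nat) : Int) by push_cast; ring]
  rw [PySem.List.pyRange_zero_natCast (2 ^ (posFrom (myBits F) 0).length)]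
  rw [List.foldl_map]
  rw [PySem.List.foldl_append_singleton_eq_map, List.nil_append, List.map_map]
  apply List.map_congr_left
  intro m hm
  have hmlt : m < 2 ^ (posFrom (myBits F) 0).length := List.mem_range.1 hm
  simp only [Function.comp]
  rw [toBinChars_natCast]
  rw [show PySem.Chars.zfill (myBits m) (((posFrom (myBits F) 0).length : Nat) : Int)
        = chStr (posFrom (myBits F) 0).length m from rfl]
  rw [alt_fold (myBits F) (chStr (posFrom (myBits F) 0).length m) (posFrom (myBits F) 0)
      (fun p hp => by simpa using posFrom_lt (myBits F) 0 p hp)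
      (by rw [length_chStr _ _ hcnt hmlt])]
  rw [show (chStr (posFrom (myBits F) 0).length m).take (posFrom (myBits F) 0).length
        = chStr (posFrom (myBits F) 0).length m from
      List.take_of_length_le (by rw [length_chStr _ _ hcnt hmlt])]
  rw [parse01 _ (substF_01 _ _ _ (myBits_01 F) (chStr_01 _ m))
      (by
        intro hnil
        have := substF_length (posFrom (myBits F) 0) (chStr (posFrom (myBits F) 0).length m)
          (myBits F)
        rw [hnil] at this
        have h2 := List.length_pos_of_ne_nil (myBits_ne_nil F)
        simp at this
        omega)]
  rfl

theorem B_char (num fixed : Int) (F : Nat) :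
    update_address_alt num fixed (F : Int)
      = ((((List.range (PySem.Int.bitLength (F : Int))).filter (fun p => F.testBit p)).map
            (fun p => 2 ^ p)).foldl (fun a w => a ++ a.map (· + w)) [0]).map
          (fun v : Nat => PySem.Int.bor (PySem.Int.band num (Int.not (F : Int))) fixed + (v : Int)) := by
  simp only [update_address_alt]
  rw [PySem.List.pyRange_zero_natCast, List.foldl_map]
  simp only [Int.toNat_natCast, Int.shiftRight_natCast_right, Int.shiftLeft_natCast_right]
  have hfun : (fun (addresses : List Int) (x : Nat) =>
      if PySem.Int.band ((F : Int) >>> x) 1 = 1 then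
        addresses ++ addresses.map (fun a => a + (1 : Int) <<< x)
      else addresses)
      = (fun (a : List Int) (p : Nat) =>
          if F.testBit p then a ++ a.map (· + ((2 ^ p : Nat) : Int)) else a) := by
    funext a p
    by_cases ht : F.testBit p
    · rw [if_pos ((band_shift_testBit F p).2 ht), if_pos ht, one_shl]
    · rw [if_neg (fun hc => ht ((band_shift_testBit F p).1 hc)), if_neg ht]
  rw [hfun]
  rw [show ([PySem.Int.bor (PySem.Int.band num (Int.not (F : Int))) fixed] : List Int)
        = ([0] : List Nat).map
            (fun v : Nat => PySem.Int.bor (PySem.Int.band num (Int.not (F : Int))) fixed + (v : Int))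
      by simp]
  rw [foldl_guard_filter]
  rw [show (fun p : Nat => ((2 ^ p : Nat) : Int))
        = (fun w : Nat => (w : Int)) ∘ (fun p : Nat => 2 ^ p) from rfl, ← List.map_map]
  rw [foldl_dbl_cast]

theorem main_eq (num fixed floating : Int) (h : 0 ≤ floating) :
    update_address num fixed floating = update_address_alt num fixed floating := by
  obtain ⟨F, rfl⟩ : ∃ F : Nat, floating = (F : Int) := ⟨floating.toNat, (Int.toNat_of_nonneg h).symm⟩
  by_cases hF0 : F = 0
  · subst hF0
    have hA : update_address num fixed ((0 : Nat) : Int)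
        = [PySem.Int.bor (PySem.Int.band num (Int.not ((0 : Nat) : Int))) fixed + 0] := rfl
    have hB : update_address_alt num fixed ((0 : Nat) : Int)
        = [PySem.Int.bor (PySem.Int.band num (Int.not ((0 : Nat) : Int))) fixed] := rfl
    rw [hA, hB, add_zero]
  · have hF : 1 ≤ F := by omega
    rw [A_char num fixed F hF, B_char num fixed F]
    congr 1
    rw [Gmain (posFrom (myBits F) 0) (myBits F) (posFrom_sorted _ 0)
        (fun p hp => by simpa using posFrom_lt (myBits F) 0 p hp)
        (by
          intro i hi hnot
          intro h1
          exact hnot ((mem_posFrom (myBits F) 0 i).2 ⟨i, hi, h1, by omega⟩))]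
    rw [← expected_foldl, corr, List.reverse_reverse]


-- ===== VERDICT (by name: the statement is the Claim_ definition above) =====
theorem update_address_spec : Claim_equal_update_address := by
  intro num fixed floating _hdom hpre
  exact main_eq num fixed floating hpre
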